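-- pv_equiv track=rewrite | github.com/immortal0900/Memory_Labyrinth | src/agents/npc/heroine_agent.py | _extract_recent_user_questions
-- ===== SOURCE A (Python) =====
-- def _extract_recent_user_questions(conversation_buffer: list) -> str:
--     """최근 대화에서 유저 질문만 추출하여 요약
--
--     Args:
--         conversation_buffer: 대화 버퍼 리스트
--
--     Returns:
--         유저 질문 요약 문자열
--     """
--     user_messages = []
--     for item in conversation_buffer:
--         if item.get("role") == "user":
--             content = item.get("content", "")
--             if content:
--                 user_messages.append(content)
--
--     if not user_messages:
--         return "없음"
--
--     # 최근 5개만 추출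
--     recent = user_messages[-5:]
--     return ", ".join(recent)
-- ===== SOURCE B (Python) =====
-- def _extract_recent_user_questions(conversation_buffer: list) -> str:
--     """Walk the buffer from the end, collect at most 5 user contents, then
--     reverse back to chronological order; early exit once 5 are found."""
--     collected = []
--     for item in reversed(conversation_buffer):
--         if item.get("role") == "user":
--             content = item.get("content", "")
--             if content:
--                 collected.append(content)
--                 if len(collected) == 5:
--                     break
--     if not collected:
--         return "없음"
--     collected.reverse()
--     return ", ".join(collected)
-- ===== Notes on version B (the rewrite author's own statement) =====
-- stated objective: alternative
-- what changed: Instead of filtering the whole buffer into a list and slicing the last 5, B walks the buffer backwards collecting at most 5 user contents with an early break, then reverses them back to chronological order.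
import Mathlib
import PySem

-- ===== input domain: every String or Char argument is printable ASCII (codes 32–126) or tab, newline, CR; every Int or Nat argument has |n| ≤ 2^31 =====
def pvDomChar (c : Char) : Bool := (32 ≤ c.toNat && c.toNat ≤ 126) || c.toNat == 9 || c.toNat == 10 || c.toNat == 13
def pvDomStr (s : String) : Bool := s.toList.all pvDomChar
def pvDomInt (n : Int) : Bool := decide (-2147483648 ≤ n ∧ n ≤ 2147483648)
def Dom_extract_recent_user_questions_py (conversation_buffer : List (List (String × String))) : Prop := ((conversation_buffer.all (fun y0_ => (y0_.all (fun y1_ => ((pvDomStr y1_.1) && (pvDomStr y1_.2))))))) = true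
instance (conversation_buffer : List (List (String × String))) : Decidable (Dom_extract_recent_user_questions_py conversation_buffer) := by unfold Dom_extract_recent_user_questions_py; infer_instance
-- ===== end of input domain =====

-- B walks the buffer backwards collecting at most 5 user contents (early break), then reverses; same return value as A's filter-then-slice.


-- dict.get(k) on the association-list encoding: first match (shared Python semantics helper)
def dget (item : List (String × String)) (k : String) : Option String :=
  (item.find? (fun p => p.1 == k)).map (·.2)

-- ===== PORT A =====
def extract_recent_user_questions_py (conversation_buffer : List (List (String × String))) : String :=
  let user_messages := conversation_buffer.foldl (fun acc item =>
    if dget item "role" == some "user" then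
      let content := (dget item "content").getD ""
      if content ≠ "" then acc ++ [content] else acc
    else acc) []
  if user_messages = [] then "없음"
  else
    let recent := PySem.List.slice user_messages (some (-5)) none
    PySem.Str.join ", " recent

-- ===== PORT B =====
def collectB : List (List (String × String)) → List String → List String
  | [], acc => acc
  | item :: rest, acc =>
    if dget item "role" == some "user" then
      let c := (dget item "content").getD ""
      if c ≠ "" then
        let acc' := acc ++ [c]
        if acc'.length == 5 then acc' else collectB rest acc'
      else collectB rest acc
    else collectB rest acc

def extract_recent_user_questions_py_alt (conversation_buffer : List (List (String × String))) : String :=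
  let collected := collectB conversation_buffer.reverse []
  if collected = [] then "없음"
  else PySem.Str.join ", " collected.reverse

-- ===== PRECONDITION & SPEC =====
def Spec_extract_recent_user_questions_py (conversation_buffer : List (List (String × String))) (out : String) : Prop := out = extract_recent_user_questions_py_alt conversation_buffer
instance (conversation_buffer : List (List (String × String))) (out : String) : Decidable (Spec_extract_recent_user_questions_py conversation_buffer out) := by unfold Spec_extract_recent_user_questions_py; infer_instance

-- ===== CLAIM (what is proved, stated in full; the proofs are below) =====
def Claim_equal_extract_recent_user_questions_py : Prop := ∀ (conversation_buffer : List (List (String × String))), Dom_extract_recent_user_questions_py conversation_buffer → Spec_extract_recent_user_questions_py conversation_buffer (extract_recent_user_questions_py conversation_buffer)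

-- ===== LEMMAS AND PROOFS =====

/-- The selection both loops make, as a filterMap step. -/
def gsel (item : List (String × String)) : Option String :=
  if dget item "role" == some "user" then
    let c := (dget item "content").getD ""
    if c ≠ "" then some c else none
  else none

theorem foldlA_eq (l : List (List (String × String))) (acc : List String) :
    l.foldl (fun acc item =>
      if dget item "role" == some "user" then
        let content := (dget item "content").getD ""
        if content ≠ "" then acc ++ [content] else acc
      else acc) acc = acc ++ l.filterMap gsel := by
  induction l generalizing acc with
  | nil => simp
  | cons item rest ih =>
    simp only [List.foldl_cons]
    rw [ih, List.filterMap_cons]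
    by_cases h1 : (dget item "role" == some "user") = true
    · by_cases h2 : (dget item "content").getD "" ≠ ""
      · have hg : gsel item = some ((dget item "content").getD "") := by
          simp [gsel, h1, h2]
        rw [hg, if_pos h1, if_pos h2]; simp
      · have hg : gsel item = none := by simp [gsel, h1]; simpa using h2
        rw [hg, if_pos h1, if_neg h2]
    · have hg : gsel item = none := by simp [gsel, h1]
      rw [hg, if_neg h1]

theorem collectB_eq (l : List (List (String × String))) (acc : List String)
    (h : acc.length < 5) :
    collectB l acc = acc ++ (l.filterMap gsel).take (5 - acc.length) := by
  induction l generalizing acc with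
  | nil => simp [collectB]
  | cons item rest ih =>
    rw [List.filterMap_cons]
    simp only [collectB]
    by_cases h1 : (dget item "role" == some "user") = true
    · rw [if_pos h1]
      by_cases h2 : (dget item "content").getD "" ≠ ""
      · have hg : gsel item = some ((dget item "content").getD "") := by
          simp [gsel, h1, h2]
        rw [if_pos h2, hg]
        by_cases h5 : ((acc ++ [(dget item "content").getD ""]).length == 5) = true
        · have h4 : acc.length = 4 := by simp at h5; omega
          rw [if_pos h5, show 5 - acc.length = 1 by omega, List.take_succ_cons,
            List.take_zero]
        · have hlen : (acc ++ [(dget item "content").getD ""]).length < 5 := by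
            simp at h5 ⊢; omega
          rw [if_neg h5, ih _ hlen,
            show 5 - acc.length = (5 - (acc ++ [(dget item "content").getD ""]).length) + 1
              by simp; omega, List.take_succ_cons]
          simp
      · have hg : gsel item = none := by simp [gsel, h1]; simpa using h2
        rw [if_neg h2, hg, ih acc h]
    · have hg : gsel item = none := by simp [gsel, h1]
      rw [if_neg h1, hg, ih acc h]

-- ===== VERDICT (by name: the statement is the Claim_ definition above) =====
theorem extract_recent_user_questions_py_spec : Claim_equal_extract_recent_user_questions_py := by
  intro buf _
  unfold Spec_extract_recent_user_questions_py extract_recent_user_questions_py extract_recent_user_questions_py_alt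
  rw [foldlA_eq, collectB_eq buf.reverse [] (by simp)]
  simp only [List.nil_append, List.filterMap_reverse, List.length_nil, Nat.sub_zero]
  set L := buf.filterMap gsel with hL
  have hrev : ((L.reverse.take 5).reverse : List String) = L.drop (L.length - 5) := by
    rw [List.take_reverse, List.reverse_reverse]
  by_cases hE : L = []
  · simp [hE]
  · have hne : L.reverse.take 5 ≠ [] := by
      simp only [ne_eq, List.take_eq_nil_iff]
      push Not
      refine ⟨by omega, by simpa using hE⟩
    rw [if_neg hE, if_neg hne, hrev]
    congr 1
    rw [PySem.List.slice_from_neg_ofNat L 5 (by omega)]
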